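-- pv_equiv track=rewrite | github.com/igorvicente0712/CollegeDB | main.py | criar_matriz_curricular
-- ===== SOURCE A (Python) =====
-- def criar_matriz_curricular(cursos, disciplinas):
--     insercoes = []
--     matriz_curricular = []
--     for i, curso in enumerate(cursos, start=1):
--         for disc in disciplinas:
--             if disc[2] == i:
--                 matriz_curricular.append((i, disc[0]))
--                 insercoes.append(
--                     f"INSERT INTO matriz_curr (id_curso, cod_disc) VALUES ({i}, '{disc[0]}');"
--                 )
--     return insercoes, matriz_curricular
-- ===== SOURCE B (Python) =====
-- def criar_matriz_curricular(cursos, disciplinas):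
--     # Different decomposition: filter once to the disciplines whose course id is
--     # in range 1..len(cursos), stably sort them by course id (sorted is stable,
--     # so original order within each course is preserved), then map out the rows.
--     # cursos itself is never iterated; only its length matters.
--     C = len(cursos)
--     kept = sorted((d for d in disciplinas if 1 <= d[2] <= C), key=lambda d: d[2])
--     insercoes = [
--         f"INSERT INTO matriz_curr (id_curso, cod_disc) VALUES ({d[2]}, '{d[0]}');"
--         for d in kept
--     ]
--     matriz_curricular = [(d[2], d[0]) for d in kept]
--     return insercoes, matriz_curricular
-- ===== Notes on version B (the rewrite author's own statement) =====
-- stated objective: faster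
-- what changed: Instead of A's nested scan of disciplinas once per course, B never iterates cursos: it filters disciplinas once to the in-range course ids, stably sorts that list by course id, and maps the sorted list to the INSERT strings and tuples.
import Mathlib
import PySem

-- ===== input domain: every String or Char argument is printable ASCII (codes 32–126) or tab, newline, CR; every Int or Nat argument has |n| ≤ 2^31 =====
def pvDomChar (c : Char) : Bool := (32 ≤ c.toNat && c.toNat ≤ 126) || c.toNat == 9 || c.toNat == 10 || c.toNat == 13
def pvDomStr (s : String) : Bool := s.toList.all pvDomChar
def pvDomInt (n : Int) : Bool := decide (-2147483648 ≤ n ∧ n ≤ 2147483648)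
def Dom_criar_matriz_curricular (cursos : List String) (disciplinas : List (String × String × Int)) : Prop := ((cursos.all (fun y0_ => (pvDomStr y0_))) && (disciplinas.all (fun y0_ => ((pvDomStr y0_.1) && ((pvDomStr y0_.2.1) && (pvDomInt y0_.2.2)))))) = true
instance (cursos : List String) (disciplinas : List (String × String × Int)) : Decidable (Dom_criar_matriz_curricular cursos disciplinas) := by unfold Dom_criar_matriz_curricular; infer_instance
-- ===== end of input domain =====

-- B never iterates cursos: it filters disciplinas to the in-range course ids, stably
-- sorts that list by course id, and maps the result to the rows (objective: faster).

-- the f-string both programs build (str(i) = PySem.Int.toStr)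
def pvMkIns (i : Int) (cod : String) : String :=
  "INSERT INTO matriz_curr (id_curso, cod_disc) VALUES (" ++ PySem.Int.toStr i ++ ", '" ++ cod ++ "');"

-- ===== PORT A =====
-- inner 'for disc in disciplinas: if disc[2] == i: append …'
def pvAInner (i : Int) : List (String × String × Int) → (List String × List (Int × String)) → (List String × List (Int × String))
  | [], acc => acc
  | d :: ds, acc =>
      pvAInner i ds (if d.2.2 == i then (acc.1 ++ [pvMkIns i d.1], acc.2 ++ [(i, d.1)]) else acc)

-- outer 'for i, curso in enumerate(cursos, start=1)'
def pvAOuter (disciplinas : List (String × String × Int)) : List String → Int → (List String × List (Int × String)) → (List String × List (Int × String))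
  | [], _, acc => acc
  | _ :: cs, i, acc => pvAOuter disciplinas cs (i + 1) (pvAInner i disciplinas acc)

def criar_matriz_curricular (cursos : List String) (disciplinas : List (String × String × Int)) : List String × (List (Int × String)) :=
  pvAOuter disciplinas cursos 1 ([], [])

-- ===== PORT B =====
-- 'kept = sorted((d for d in disciplinas if 1 <= d[2] <= C), key=lambda d: d[2])'
-- then the two comprehensions over kept
def criar_matriz_curricular_alt (cursos : List String) (disciplinas : List (String × String × Int)) : List String × (List (Int × String)) :=
  let C : Int := PySem.List.len cursos
  let kept := PySem.List.sorted (disciplinas.filter (fun d => decide (1 ≤ d.2.2 ∧ d.2.2 ≤ C))) (fun d => d.2.2)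
  (kept.map (fun d => pvMkIns d.2.2 d.1), kept.map (fun d => (d.2.2, d.1)))

-- ===== PRECONDITION & SPEC =====
def Spec_criar_matriz_curricular (cursos : List String) (disciplinas : List (String × String × Int)) (out : List String × (List (Int × String))) : Prop := out = criar_matriz_curricular_alt cursos disciplinas
instance (cursos : List String) (disciplinas : List (String × String × Int)) (out : List String × (List (Int × String))) : Decidable (Spec_criar_matriz_curricular cursos disciplinas out) := by unfold Spec_criar_matriz_curricular; infer_instance

-- ===== CLAIM (what is proved, stated in full; the proofs are below) =====
def Claim_equal_criar_matriz_curricular : Prop := ∀ (cursos : List String) (disciplinas : List (String × String × Int)), Dom_criar_matriz_curricular cursos disciplinas → Spec_criar_matriz_curricular cursos disciplinas (criar_matriz_curricular cursos disciplinas)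

-- ===== LEMMAS AND PROOFS =====

-- A's inner loop appends the i-filtered disciplines
lemma pvAInner_eq (i : Int) (ds : List (String × String × Int)) (acc : List String × List (Int × String)) :
    pvAInner i ds acc =
      (acc.1 ++ ((ds.filter (fun d => d.2.2 == i)).map (fun d => pvMkIns d.2.2 d.1)),
       acc.2 ++ ((ds.filter (fun d => d.2.2 == i)).map (fun d => (d.2.2, d.1)))) := by
  induction ds generalizing acc with
  | nil => simp [pvAInner]
  | cons d ds ih =>
      by_cases h : d.2.2 == i
      · have he : d.2.2 = i := beq_iff_eq.mp h
        simp [pvAInner, ih, he]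
      · simp [pvAInner, h, ih]

-- A's whole computation is the flatMap of the per-course filters over 1..C
lemma pvAOuter_eq (ds : List (String × String × Int)) (cs : List String) (s : Int) (acc : List String × List (Int × String)) :
    pvAOuter ds cs s acc =
      (acc.1 ++ (((PySem.List.pyRange s (s + cs.length) 1).flatMap (fun v => ds.filter (fun d => d.2.2 == v))).map (fun d => pvMkIns d.2.2 d.1)),
       acc.2 ++ (((PySem.List.pyRange s (s + cs.length) 1).flatMap (fun v => ds.filter (fun d => d.2.2 == v))).map (fun d => (d.2.2, d.1)))) := by
  induction cs generalizing s acc with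
  | nil => simp [pvAOuter, PySem.List.pyRange_one_eq_nil]
  | cons c cs ih =>
      simp only [pvAOuter, pvAInner_eq, ih, List.length_cons]
      have hb : s + (((cs.length + 1 : Nat)) : Int) = (s + 1) + (cs.length : Int) := by push_cast; ring
      rw [hb, PySem.List.pyRange_one_cons (show s < (s + 1) + (cs.length : Int) by omega)]
      simp only [List.flatMap_cons, List.map_append, List.append_assoc]

-- stability of insertBy on a key-sorted list, seen through a key-equality filter
lemma pvFilter_insertBy {α : Type} (key : α → Int) (v : Int) (x : α) (ys : List α)
    (hp : ys.Pairwise (fun a b => key a ≤ key b)) :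
    (PySem.List.insertBy (fun a b => decide (key a < key b)) x ys).filter (fun y => key y == v) =
      ys.filter (fun y => key y == v) ++ (if key x == v then [x] else []) := by
  induction ys with
  | nil => by_cases h : key x == v <;> simp [PySem.List.insertBy, h]
  | cons y ys ih =>
      rw [List.pairwise_cons] at hp
      by_cases hb : key x < key y
      · -- x goes in front; then nothing ≤ v can follow if key x = v
        have : PySem.List.insertBy (fun a b => decide (key a < key b)) x (y :: ys) = x :: y :: ys := by
          simp [PySem.List.insertBy, hb]
        rw [this]
        by_cases hv : key x == v
        · have hxv : key x = v := beq_iff_eq.mp hv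
          have hy : ¬ (key y == v) := by simp [beq_iff_eq]; omega
          have hys : (ys.filter (fun z => key z == v)) = [] := by
            rw [List.filter_eq_nil_iff]
            intro z hz
            have := hp.1 z hz
            simp [beq_iff_eq]; omega
          simp [hv, hy, hys]
        · simp [hv, List.filter_cons]
      · have : PySem.List.insertBy (fun a b => decide (key a < key b)) x (y :: ys) =
            y :: PySem.List.insertBy (fun a b => decide (key a < key b)) x ys := by
          simp [PySem.List.insertBy, hb]
        rw [this]
        by_cases hy : key y == v <;> simp [hy, ih hp.2]

-- stability of the whole sort, through a key-equality filter
lemma pvFilter_sorted {α : Type} (key : α → Int) (v : Int) (xs : List α) :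
    (PySem.List.sorted xs key).filter (fun y => key y == v) = xs.filter (fun y => key y == v) := by
  suffices h : ∀ (acc : List α), acc.Pairwise (fun a b => key a ≤ key b) →
      (xs.foldl (fun acc x => PySem.List.insertBy (fun a b => decide (key a < key b)) x acc) acc).filter (fun y => key y == v) =
        acc.filter (fun y => key y == v) ++ xs.filter (fun y => key y == v) by
    rw [PySem.List.sorted_eq_foldl_insertBy]
    simpa using h [] (by simp)
  induction xs with
  | nil => intro acc _; simp
  | cons x xs ih =>
      intro acc hacc
      simp only [List.foldl_cons]
      rw [ih _ (PySem.List.insertBy_pairwise_le key x acc hacc), pvFilter_insertBy key v x acc hacc]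
      by_cases hv : key x == v <;> simp [hv]

-- a key-sorted list with keys in [a, b) is the concatenation of its key fibres over a..b-1
lemma pvPairwise_eq_flatMap {α : Type} (key : α → Int) :
    ∀ (n : Nat) (a : Int) (l : List α),
      l.Pairwise (fun x y => key x ≤ key y) →
      (∀ x ∈ l, a ≤ key x ∧ key x < a + n) →
      (PySem.List.pyRange a (a + n) 1).flatMap (fun v => l.filter (fun x => key x == v)) = l := by
  intro n
  induction n with
  | zero =>
      intro a l _ hmem
      have : l = [] := by
        cases l with
        | nil => rfl
        | cons x xs => exact absurd (hmem x (by simp)) (by push_cast; omega)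
      simp [this]
  | succ n ih =>
      intro a l hp hmem
      have hr : PySem.List.pyRange a (a + (n + 1 : Nat)) 1 = a :: PySem.List.pyRange (a + 1) (a + (n + 1 : Nat)) 1 :=
        PySem.List.pyRange_one_cons (by push_cast; omega)
      -- split l into its key-a prefix and the rest
      have hsplit : ∀ (m : List α), m.Pairwise (fun x y => key x ≤ key y) → (∀ x ∈ m, a ≤ key x) →
          m = m.filter (fun x => key x == a) ++ m.filter (fun x => !(key x == a)) := by
        intro m
        induction m with
        | nil => simp
        | cons x xs ihm =>
            intro hpm hlo
            rw [List.pairwise_cons] at hpm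
            by_cases hx : key x == a
            · have hrec := ihm hpm.2 (fun z hz => hlo z (List.mem_cons_of_mem _ hz))
              simpa [List.filter_cons, hx] using hrec
            · have hgt : ∀ z ∈ xs, ¬ (key z == a) := by
                intro z hz
                have h1 := hpm.1 z hz
                have h2 := hlo x (by simp)
                simp only [beq_iff_eq] at hx ⊢
                omega
              have hnil : xs.filter (fun z => key z == a) = [] := List.filter_eq_nil_iff.mpr (by simpa using hgt)
              have hall : xs.filter (fun z => !(key z == a)) = xs :=
                List.filter_eq_self.mpr (by simpa using hgt)
              simp [hx, hnil, hall]
      have hl := hsplit l hp (fun x hx => (hmem x hx).1)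
      set t := l.filter (fun x => key x == a) with ht
      set r := l.filter (fun x => !(key x == a)) with hr2
      have hrest : (PySem.List.pyRange (a + 1) (a + (n + 1 : Nat)) 1).flatMap (fun v => l.filter (fun x => key x == v)) = r := by
        have hcong : ∀ v ∈ PySem.List.pyRange (a + 1) (a + (n + 1 : Nat)) 1,
            l.filter (fun x => key x == v) = r.filter (fun x => key x == v) := by
          intro v hv
          have hva : a + 1 ≤ v := (PySem.List.mem_pyRange_one.mp hv).1
          rw [hr2, List.filter_filter]
          apply List.filter_congr
          intro x _
          by_cases hx : key x == v
          · have hxv : key x = v := beq_iff_eq.mp hx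
            have hna : key x ≠ a := by omega
            simp [hx, hna]
          · simp [hx]
        rw [List.flatMap_congr hcong]
        have hab : a + (n + 1 : Nat) = (a + 1) + (n : Nat) := by push_cast; ring
        rw [hab]
        apply ih
        · exact hp.sublist List.filter_sublist
        · intro x hx
          have hxl : x ∈ l := List.mem_of_mem_filter hx
          have h1 := hmem x hxl
          have h2 : ¬ (key x == a) := by
            have := List.of_mem_filter hx
            simpa using this
          simp only [beq_iff_eq] at h2
          push_cast at h1 ⊢
          omega
      rw [hr, List.flatMap_cons, hrest, ← ht, hl]

-- B's sorted kept list IS A's flatMap of fibres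
lemma pvSorted_eq_flatMap (cursos : List String) (ds : List (String × String × Int)) :
    PySem.List.sorted (ds.filter (fun d => decide (1 ≤ d.2.2 ∧ d.2.2 ≤ (cursos.length : Int)))) (fun d => d.2.2) =
      (PySem.List.pyRange 1 (1 + cursos.length) 1).flatMap (fun v => ds.filter (fun d => d.2.2 == v)) := by
  set kept := ds.filter (fun d => decide (1 ≤ d.2.2 ∧ d.2.2 ≤ (cursos.length : Int))) with hk
  set s := PySem.List.sorted kept (fun d => d.2.2) with hs
  have h1 : (PySem.List.pyRange 1 (1 + cursos.length) 1).flatMap (fun v => s.filter (fun d => d.2.2 == v)) = s := by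
    have := pvPairwise_eq_flatMap (fun d : String × String × Int => d.2.2) cursos.length 1 s
      (PySem.List.sorted_pairwise kept (fun d => d.2.2))
      (by
        intro x hx
        have hxk : x ∈ kept := (PySem.List.mem_sorted _ _ _ _).mp hx
        have h2 := List.of_mem_filter hxk
        simp only [decide_eq_true_eq] at h2
        show 1 ≤ x.2.2 ∧ x.2.2 < 1 + (cursos.length : Nat)
        omega)
    rwa [show (1 : Int) + cursos.length = 1 + (cursos.length : Nat) by ring] at this
  rw [← h1]
  apply List.flatMap_congr
  intro v hv
  have hv' := PySem.List.mem_pyRange_one.mp hv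
  rw [hs, pvFilter_sorted, hk, List.filter_filter]
  apply List.filter_congr
  intro x _
  by_cases hx : x.2.2 == v
  · have : (1 ≤ x.2.2 ∧ x.2.2 ≤ (cursos.length : Int)) := by
      simp only [beq_iff_eq] at hx; omega
    simp [hx, this]
  · simp [hx]

-- ===== VERDICT (by name: the statement is the Claim_ definition above) =====
theorem criar_matriz_curricular_spec : Claim_equal_criar_matriz_curricular := by
  intro cursos disciplinas _
  unfold Spec_criar_matriz_curricular criar_matriz_curricular criar_matriz_curricular_alt
  rw [pvAOuter_eq]
  simp only [PySem.List.len_eq, List.nil_append]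
  rw [← pvSorted_eq_flatMap cursos disciplinas]
  rfl
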